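-- pv_equiv track=rewrite | github.com/OSCOSS/Dataset_Detcter | src/Result/itembyitem.py | sentancespliter
-- ===== SOURCE A (Python) =====
-- def sentancespliter(spf,query):
--     ls=query.split('. ')
--     lstemp=[]
--     for item in ls:
--         ls1=item.split(';')
--         for item1 in ls1:
--             lstemp.append(item1)
--
--     for item in lstemp:
--         if spf in item:
--             return item
-- ===== SOURCE B (Python) =====
-- def sentancespliter(spf, query):
--     # One left-to-right character scan: cut at ';' or at '. ', test each
--     # segment as soon as it is complete, return on the first hit.
--     cur = []
--     i = 0
--     n = len(query)
--     while i < n: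
--         c = query[i]
--         if c == ';':
--             seg = ''.join(cur)
--             if spf in seg:
--                 return seg
--             cur = []
--             i += 1
--         elif c == '.' and i + 1 < n and query[i + 1] == ' ':
--             seg = ''.join(cur)
--             if spf in seg:
--                 return seg
--             cur = []
--             i += 2
--         else:
--             cur.append(c)
--             i += 1
--     seg = ''.join(cur)
--     if spf in seg:
--         return seg
--     return None
-- ===== Notes on version B (the rewrite author's own statement) =====
-- stated objective: alternative
-- what changed: Replaces A's two-level split (split on '. ', re-split each piece on ';', collect everything into an intermediate list, then scan it) by a single left-to-right character scan that cuts segments at ';' or '. ' on the fly and returns the first segment containing spf without ever materialising the segment list.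
import Mathlib
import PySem

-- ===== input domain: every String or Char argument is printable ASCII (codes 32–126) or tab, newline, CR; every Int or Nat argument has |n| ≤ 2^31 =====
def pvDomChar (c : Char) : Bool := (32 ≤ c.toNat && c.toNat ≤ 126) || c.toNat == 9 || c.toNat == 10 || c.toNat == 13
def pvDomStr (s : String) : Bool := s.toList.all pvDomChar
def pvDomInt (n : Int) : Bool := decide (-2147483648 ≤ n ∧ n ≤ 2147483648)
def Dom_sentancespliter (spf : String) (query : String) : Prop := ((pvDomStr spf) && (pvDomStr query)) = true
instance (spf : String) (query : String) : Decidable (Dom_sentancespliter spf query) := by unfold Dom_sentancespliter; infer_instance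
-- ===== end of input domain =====

-- B replaces A's nested split-and-flatten (split on '. ', re-split each piece on ';',
-- collect all pieces, then scan) by a single left-to-right character scan that cuts at
-- ';' or '. ' and tests each segment as soon as it is complete (objective: alternative).

-- ===== PORT A =====
-- Python str.split(sep) with nonempty sep is PySem.Chars.splitOn on the code points
-- (exact); pieces are wrapped back to String with String.ofList.
def pvAFirst (spf : String) : List String → Option String
  | [] => none
  | item :: rest => if PySem.Str.isIn spf item then some item else pvAFirst spf rest

def sentancespliter (spf : String) (query : String) : Option String :=
  let ls := (PySem.Chars.splitOn query.toList ". ".toList).map String.ofList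
  let lstemp := ls.foldl (fun acc item =>
    ((PySem.Chars.splitOn item.toList ";".toList).map String.ofList).foldl
      (fun a item1 => a ++ [item1]) acc) []
  pvAFirst spf lstemp

-- ===== PORT B =====
-- Source B's while loop over index i with accumulator cur, as recursion on the remaining
-- characters; `spf in seg` is PySem.Chars.isIn (exact).
def pvAltLoop (spf : List Char) : List Char → List Char → Option String
  | [], cur => if PySem.Chars.isIn spf cur then some (String.ofList cur) else none
  | c :: rest, cur =>
    if c = ';' then
      if PySem.Chars.isIn spf cur then some (String.ofList cur) else pvAltLoop spf rest []
    else if c = '.' ∧ rest.head? = some ' ' then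
      if PySem.Chars.isIn spf cur then some (String.ofList cur) else pvAltLoop spf rest.tail []
    else pvAltLoop spf rest (cur ++ [c])
termination_by cs _ => cs.length
decreasing_by all_goals (simp [List.length_tail]; try omega)

def sentancespliter_alt (spf : String) (query : String) : Option String :=
  pvAltLoop spf.toList query.toList []

-- ===== PRECONDITION & SPEC =====
def Spec_sentancespliter (spf : String) (query : String) (out : Option String) : Prop := out = sentancespliter_alt spf query
instance (spf : String) (query : String) (out : Option String) : Decidable (Spec_sentancespliter spf query out) := by unfold Spec_sentancespliter; infer_instance

-- ===== CLAIM (what is proved, stated in full; the proofs are below) =====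
def Claim_equal_sentancespliter : Prop := ∀ (spf : String) (query : String), Dom_sentancespliter spf query → Spec_sentancespliter spf query (sentancespliter spf query)

-- ===== LEMMAS AND PROOFS =====

-- reference (recursive, fuel-free) form of str.split(sep) for the nonempty separator s0 :: sep'
def pvSsplit (s0 : Char) (sep' : List Char) : List Char → List (List Char)
  | [] => [[]]
  | c :: rest =>
    if (s0 :: sep').isPrefixOf (c :: rest) then
      [] :: pvSsplit s0 sep' (rest.drop sep'.length)
    else
      match pvSsplit s0 sep' rest with
      | [] => []
      | h :: t => (c :: h) :: t
termination_by cs => cs.length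
decreasing_by all_goals (simp [List.length_drop]; try omega)

def pvConsHead (pre : List Char) : List (List Char) → List (List Char)
  | [] => []
  | h :: t => (pre ++ h) :: t

-- first segment (as a String) containing spf
def pvFirstMatch (spf : List Char) : List (List Char) → Option String
  | [] => none
  | s :: rest => if PySem.Chars.isIn spf s then some (String.ofList s) else pvFirstMatch spf rest

-- the flat segment list B's scan walks through
def pvSegsFlat : List Char → List Char → List (List Char)
  | [], cur => [cur]
  | c :: rest, cur =>
    if c = ';' then cur :: pvSegsFlat rest []
    else if c = '.' ∧ rest.head? = some ' ' then cur :: pvSegsFlat rest.tail []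
    else pvSegsFlat rest (cur ++ [c])
termination_by cs _ => cs.length
decreasing_by all_goals (simp [List.length_tail]; try omega)

theorem pvSsplit_ne_nil (s0 : Char) (sep' : List Char) (cs : List Char) :
    pvSsplit s0 sep' cs ≠ [] := by
  fun_induction pvSsplit s0 sep' cs
  all_goals simp_all

theorem pvSsplit_exists (s0 : Char) (sep' : List Char) (cs : List Char) :
    ∃ h t, pvSsplit s0 sep' cs = h :: t := by
  cases h1 : pvSsplit s0 sep' cs with
  | nil => exact absurd h1 (pvSsplit_ne_nil _ _ _)
  | cons a b => exact ⟨a, b, rfl⟩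

theorem pvSsplit_cons_pos (s0 : Char) (sep' : List Char) (c : Char) (rest : List Char)
    (hp : (s0 :: sep').isPrefixOf (c :: rest) = true) :
    pvSsplit s0 sep' (c :: rest) = [] :: pvSsplit s0 sep' (rest.drop sep'.length) := by
  rw [pvSsplit.eq_def]; simp [hp]

theorem pvSsplit_cons_neg (s0 : Char) (sep' : List Char) (c : Char) (rest h : List Char)
    (t : List (List Char))
    (hp : ¬ ((s0 :: sep').isPrefixOf (c :: rest) = true))
    (hr : pvSsplit s0 sep' rest = h :: t) :
    pvSsplit s0 sep' (c :: rest) = (c :: h) :: t := by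
  rw [pvSsplit.eq_def]; simp [hp, hr]

-- PySem's fuel-based splitOn.go computes pvSsplit
theorem pvGo_spec (s0 : Char) (sep' : List Char) :
    ∀ (fuel : Nat) (l cur : List Char) (acc : List (List Char)), l.length < fuel →
      PySem.Chars.splitOn.go (s0 :: sep') fuel l cur acc
        = acc.reverse ++ pvConsHead cur.reverse (pvSsplit s0 sep' l) := by
  intro fuel
  induction fuel with
  | zero => intro l cur acc h; omega
  | succ fuel ih =>
    intro l cur acc h
    cases l with
    | nil =>
      rw [PySem.Chars.splitOn.go.eq_def]
      simp [pvSsplit, pvConsHead]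
    | cons c rest =>
      rw [PySem.Chars.splitOn.go.eq_def]
      simp only []
      by_cases hp : (s0 :: sep').isPrefixOf (c :: rest) = true
      · rw [if_pos hp]
        rw [ih _ _ _ (by simp at h ⊢; omega)]
        obtain ⟨h0, t0, hss⟩ := pvSsplit_exists s0 sep' (rest.drop sep'.length)
        rw [pvSsplit_cons_pos s0 sep' c rest hp]
        simp [hss, pvConsHead, List.drop_succ_cons]
      · rw [if_neg hp]
        rw [ih _ _ _ (by simp at h ⊢; omega)]
        obtain ⟨h0, t0, hss⟩ := pvSsplit_exists s0 sep' rest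
        rw [pvSsplit_cons_neg s0 sep' c rest h0 t0 hp hss]
        simp [hss, pvConsHead]

theorem pvSplitOn_eq (s0 : Char) (sep' : List Char) (cs : List Char) :
    PySem.Chars.splitOn cs (s0 :: sep') = pvSsplit s0 sep' cs := by
  unfold PySem.Chars.splitOn
  rw [pvGo_spec s0 sep' (cs.length + 1) cs [] [] (by omega)]
  obtain ⟨h0, t0, hss⟩ := pvSsplit_exists s0 sep' cs
  simp [hss, pvConsHead]

-- the flat segment list IS the flattening of the nested '. '-then-';' split
theorem pvSegsFlat_eq (cs cur : List Char) :
    pvSegsFlat cs cur = pvConsHead cur ((pvSsplit '.' [' '] cs).flatMap (pvSsplit ';' [])) := by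
  fun_induction pvSegsFlat cs cur with
  | case1 cur => simp [pvSsplit, pvConsHead]
  | case2 rest cur ih =>
    obtain ⟨h0, t0, hss⟩ := pvSsplit_exists '.' [' '] rest
    obtain ⟨h1, t1, hs1⟩ := pvSsplit_exists ';' [] h0
    rw [pvSsplit_cons_neg '.' [' '] ';' rest h0 t0 (by simp [List.isPrefixOf]) hss]
    rw [ih, hss]
    have hsemi : pvSsplit ';' [] (';' :: h0) = [] :: pvSsplit ';' [] h0 := by
      rw [pvSsplit_cons_pos ';' [] ';' h0 (by simp [List.isPrefixOf])]; simp
    simp [hsemi, hs1, pvConsHead]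
  | case3 c rest cur hc hdot ih =>
    obtain ⟨hc', hsp⟩ := hdot
    subst hc'
    cases rest with
    | nil => simp at hsp
    | cons r rs =>
      simp at hsp; subst hsp
      rw [pvSsplit_cons_pos '.' [' '] '.' (' '::rs) (by simp [List.isPrefixOf])]
      obtain ⟨h0, t0, hss⟩ := pvSsplit_exists '.' [' '] rs
      simp only [List.length_cons, List.length_nil, List.drop_succ_cons, List.drop_zero,
        List.tail_cons] at ih ⊢
      obtain ⟨h1, t1, hs1⟩ := pvSsplit_exists ';' [] h0
      rw [ih, hss]
      simp [pvSsplit, pvConsHead, hs1]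
  | case4 c rest cur hc hdot ih =>
    obtain ⟨h0, t0, hss⟩ := pvSsplit_exists '.' [' '] rest
    obtain ⟨h1, t1, hs1⟩ := pvSsplit_exists ';' [] h0
    have hp : ¬ (('.' :: [' ']).isPrefixOf (c :: rest) = true) := by
      intro hcontra
      cases rest with
      | nil => simp [List.isPrefixOf] at hcontra
      | cons r rs =>
        simp [List.isPrefixOf] at hcontra
        exact hdot ⟨hcontra.1.symm, by simp [hcontra.2.symm]⟩
    rw [ih, hss]
    rw [pvSsplit_cons_neg '.' [' '] c rest h0 t0 hp hss]
    simp only [List.flatMap_cons]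
    rw [pvSsplit_cons_neg ';' [] c h0 h1 t1 (by simp [List.isPrefixOf]; intro h; exact hc h.symm) hs1]
    simp [hs1, pvConsHead]

-- B's scan is the first-match scan of the flat segment list
theorem pvAltLoop_eq (spf : List Char) (cs cur : List Char) :
    pvAltLoop spf cs cur = pvFirstMatch spf (pvSegsFlat cs cur) := by
  fun_induction pvAltLoop spf cs cur
  all_goals simp_all [pvSegsFlat, pvFirstMatch]
  all_goals rw [if_neg (by tauto)]

theorem pvFoldl_app {α : Type} (xs : List α) (acc : List α) :
    xs.foldl (fun a x => a ++ [x]) acc = acc ++ xs := by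
  induction xs generalizing acc with
  | nil => simp
  | cons x t ih => simp [List.foldl_cons, ih]

-- A's scan over Strings is the first-match scan over the underlying char lists
theorem pvAFirst_eq (spf : String) (xs : List (List Char)) :
    pvAFirst spf (xs.map String.ofList) = pvFirstMatch spf.toList xs := by
  induction xs with
  | nil => simp [pvAFirst, pvFirstMatch]
  | cons x t ih =>
    simp only [List.map_cons, pvAFirst, pvFirstMatch]
    rw [ih]
    simp

-- ===== VERDICT (by name: the statement is the Claim_ definition above) =====
theorem sentancespliter_spec : Claim_equal_sentancespliter := by
  intro spf query _
  unfold Spec_sentancespliter sentancespliter sentancespliter_alt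
  simp only [pvFoldl_app, PySem.List.foldl_append_eq_flatMap, List.nil_append]
  have hdot : ". ".toList = '.' :: [' '] := rfl
  have hsemi : ";".toList = ';' :: ([] : List Char) := rfl
  rw [hdot, hsemi, pvSplitOn_eq]
  have hflat : (List.flatMap
      (fun item => (PySem.Chars.splitOn item.toList (';' :: [])).map String.ofList)
      ((pvSsplit '.' [' '] query.toList).map String.ofList))
      = ((pvSsplit '.' [' '] query.toList).flatMap (pvSsplit ';' [])).map String.ofList := by
    rw [List.flatMap_map, List.map_flatMap]
    refine List.flatMap_congr ?_
    intro piece _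
    rw [show (String.ofList piece).toList = piece by simp, pvSplitOn_eq]
  rw [hflat, pvAFirst_eq, pvAltLoop_eq]
  obtain ⟨h0, t0, hss⟩ := pvSsplit_exists '.' [' '] query.toList
  obtain ⟨h1, t1, hs1⟩ := pvSsplit_exists ';' [] h0
  rw [pvSegsFlat_eq, hss]
  simp [hs1, pvConsHead]
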